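-- pv_equiv track=rewrite | github.com/cuzureau/n_puzzle | main.py | define_goal_state
-- ===== SOURCE A (Python) =====
-- def define_goal_state(length):
-- 	m = [[0] * length for i in range(length)]
-- 	dx, dy = [0, 1, 0, -1], [1, 0, -1, 0]
-- 	x, y, c = 0, -1, 1
-- 	for i in range(length + length - 2):
-- 		for j in range((length + length - i) // 2):
-- 			x += dx[i % 4]
-- 			y += dy[i % 4]
-- 			m[x][y] = c
-- 			c += 1
-- 	n = []
-- 	for i in m:
-- 		for j in i:
-- 			n.append(j)
--
-- 	return tuple(n)
-- ===== SOURCE B (Python) =====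
-- def fill_edge(g, x, y, dx, dy, steps, c, last):
--     while steps > 0 and c <= last:
--         g[x][y] = c
--         c += 1
--         x += dx
--         y += dy
--         steps -= 1
--     return c
--
--
-- def define_goal_state(length):
--     if length <= 0:
--         return ()
--     g = [[0] * length for _ in range(length)]
--     last = length * length - 1
--     top, bottom, left, right = 0, length - 1, 0, length - 1
--     c = 1
--     while top <= bottom and left <= right and c <= last:
--         c = fill_edge(g, top, left, 0, 1, right - left + 1, c, last)
--         c = fill_edge(g, top + 1, right, 1, 0, bottom - top, c, last)
--         c = fill_edge(g, bottom, right - 1, 0, -1, right - left, c, last)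
--         c = fill_edge(g, bottom - 1, left, -1, 0, bottom - top - 1, c, last)
--         top += 1
--         bottom -= 1
--         left += 1
--         right -= 1
--     return tuple(v for row in g for v in row)
-- ===== Notes on version B (the rewrite author's own statement) =====
-- stated objective: alternative
-- what changed: A walks one spiral cursor through 2*length-2 direction-indexed segments of arithmetically computed lengths ((2L-i)//2, dx/dy tables, i%4); B is the classic boundary-shrinking spiral: it keeps top/bottom/left/right bounds, fills the four edges of the current ring with a counter capped at length^2-1, shrinks the bounds and repeats, so the blank 0 lands on the last spiral cell.
import Mathlib
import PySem

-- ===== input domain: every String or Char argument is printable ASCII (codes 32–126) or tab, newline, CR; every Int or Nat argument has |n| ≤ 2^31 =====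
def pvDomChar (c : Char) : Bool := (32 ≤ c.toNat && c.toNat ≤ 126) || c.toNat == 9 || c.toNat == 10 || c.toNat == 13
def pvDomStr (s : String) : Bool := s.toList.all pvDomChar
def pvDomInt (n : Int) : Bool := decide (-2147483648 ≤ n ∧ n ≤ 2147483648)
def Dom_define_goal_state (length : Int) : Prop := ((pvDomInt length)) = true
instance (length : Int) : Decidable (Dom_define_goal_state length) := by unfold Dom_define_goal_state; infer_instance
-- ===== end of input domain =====

-- B rebuilds the same spiral goal tuple by the classic boundary-shrinking four-edge walk
-- instead of A's direction-table cursor over 2L-2 segments (objective: alternative, same cost).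

-- ===== PORT A =====
-- m[x][y] = c  (Python negative indices wrap; A's walk only ever writes in range, so the
-- out-of-range branches below are never reached on any execution)
def pySetCell (m : List (List Int)) (x y c : Int) : List (List Int) :=
  let xi : Int := if x < 0 then x + (m.length : Int) else x
  if xi < 0 then m else
    match m[xi.toNat]? with
    | none => m
    | some row =>
      let yi : Int := if y < 0 then y + (row.length : Int) else y
      if yi < 0 then m else m.set xi.toNat (row.set yi.toNat c)

def define_goal_state (length : Int) : List Int :=
  let m : List (List Int) :=
    (PySem.List.pyRange 0 length 1).map (fun _ => List.replicate length.toNat 0)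
  let dx : List Int := [0, 1, 0, -1]
  let dy : List Int := [1, 0, -1, 0]
  let st :=
    (PySem.List.pyRange 0 (length + length - 2) 1).foldl
      (fun (st : List (List Int) × Int × Int × Int) i =>
        (PySem.List.pyRange 0 (PySem.Int.floordiv (length + length - i) 2) 1).foldl
          (fun (st2 : List (List Int) × Int × Int × Int) _j =>
            let x := st2.2.1 + PySem.List.pyGetD dx (PySem.Int.mod i 4) 0
            let y := st2.2.2.1 + PySem.List.pyGetD dy (PySem.Int.mod i 4) 0
            let c := st2.2.2.2
            (pySetCell st2.1 x y c, x, y, c + 1))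
          st)
      (m, 0, -1, 1)
  st.1.foldl (fun n row => row.foldl (fun n v => n ++ [v]) n) []

-- ===== PORT B =====
-- while steps > 0 and c <= last: g[x][y] = c; c += 1; x += dx; y += dy; steps -= 1
def fillEdge (g : List (List Int)) (x y dx dy steps c last : Int) :
    List (List Int) × Int :=
  if 0 < steps ∧ c ≤ last then
    fillEdge (pySetCell g x y c) (x + dx) (y + dy) dx dy (steps - 1) (c + 1) last
  else (g, c)
termination_by steps.toNat
decreasing_by omega

-- while top <= bottom and left <= right and c <= last: fill the four edges, shrink bounds
def spiralLoop (g : List (List Int)) (top bottom left right c last : Int) :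
    List (List Int) :=
  if top ≤ bottom ∧ left ≤ right ∧ c ≤ last then
    let p1 := fillEdge g top left 0 1 (right - left + 1) c last
    let p2 := fillEdge p1.1 (top + 1) right 1 0 (bottom - top) p1.2 last
    let p3 := fillEdge p2.1 bottom (right - 1) 0 (-1) (right - left) p2.2 last
    let p4 := fillEdge p3.1 (bottom - 1) left (-1) 0 (bottom - top - 1) p3.2 last
    spiralLoop p4.1 (top + 1) (bottom - 1) (left + 1) (right - 1) p4.2 last
  else g
termination_by (bottom - top + 1).toNat
decreasing_by omega

def define_goal_state_alt (length : Int) : List Int :=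
  if length ≤ 0 then []
  else
    let g : List (List Int) :=
      (PySem.List.pyRange 0 length 1).map (fun _ => List.replicate length.toNat 0)
    let last := length * length - 1
    let g' := spiralLoop g 0 (length - 1) 0 (length - 1) 1 last
    g'.flatMap id

-- ===== PRECONDITION & SPEC =====
def Spec_define_goal_state (length : Int) (out : List Int) : Prop := out = define_goal_state_alt length
instance (length : Int) (out : List Int) : Decidable (Spec_define_goal_state length out) := by unfold Spec_define_goal_state; infer_instance

-- ===== CLAIM (what is proved, stated in full; the proofs are below) =====
def Claim_equal_define_goal_state : Prop := ∀ (length : Int), Dom_define_goal_state length → Spec_define_goal_state length (define_goal_state length)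

-- ===== LEMMAS AND PROOFS =====

-- A write list applied in order; both ports reduce to applying a write list to the zero grid.
def applyWrites (ws : List ((Int × Int) × Int)) (m : List (List Int)) : List (List Int) :=
  ws.foldl (fun m w => pySetCell m w.1.1 w.1.2 w.2) m

theorem applyWrites_append (a b : List ((Int × Int) × Int)) (m : List (List Int)) :
    applyWrites (a ++ b) m = applyWrites b (applyWrites a m) := by
  simp [applyWrites, List.foldl_append]

-- A's inner loop as a pure write list: n pre-move steps in direction (dx,dy) from cursor (x,y).
def segPath (x y dx dy c : Int) : Nat → List ((Int × Int) × Int)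
  | 0 => []
  | n + 1 => ((x + dx, y + dy), c) :: segPath (x + dx) (y + dy) dx dy (c + 1) n

theorem segPath_length (x y dx dy c : Int) (n : Nat) :
    (segPath x y dx dy c n).length = n := by
  induction n generalizing x y c with
  | zero => rfl
  | succ n ih => simp [segPath, ih]

-- B's edge as a pure write list (post-move writes, capped by the counter budget).
def edgePath (x y dx dy steps c last : Int) : List ((Int × Int) × Int) :=
  if 0 < steps ∧ c ≤ last then
    ((x, y), c) :: edgePath (x + dx) (y + dy) dx dy (steps - 1) (c + 1) last
  else []
termination_by steps.toNat
decreasing_by omega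

-- B's whole loop as a pure write list.
def loopPath (top bottom left right c last : Int) : List ((Int × Int) × Int) :=
  if top ≤ bottom ∧ left ≤ right ∧ c ≤ last then
    let e1 := edgePath top left 0 1 (right - left + 1) c last
    let c1 := c + e1.length
    let e2 := edgePath (top + 1) right 1 0 (bottom - top) c1 last
    let c2 := c1 + e2.length
    let e3 := edgePath bottom (right - 1) 0 (-1) (right - left) c2 last
    let c3 := c2 + e3.length
    let e4 := edgePath (bottom - 1) left (-1) 0 (bottom - top - 1) c3 last
    let c4 := c3 + e4.length
    e1 ++ (e2 ++ (e3 ++ (e4 ++ loopPath (top + 1) (bottom - 1) (left + 1) (right - 1) c4 last)))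
  else []
termination_by (bottom - top + 1).toNat
decreasing_by omega

-- A's outer loop as a pure write list with the final cursor/counter state.
def pathGenA (L : Int) : List Int → Int → Int → Int → List ((Int × Int) × Int) × Int × Int × Int
  | [], x, y, c => ([], x, y, c)
  | i :: rest, x, y, c =>
      let dxv := PySem.List.pyGetD [0, 1, 0, -1] (PySem.Int.mod i 4) 0
      let dyv := PySem.List.pyGetD [1, 0, -1, 0] (PySem.Int.mod i 4) 0
      let n := (PySem.Int.floordiv (L + L - i) 2).toNat
      let r := pathGenA L rest (x + dxv * n) (y + dyv * n) (c + n)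
      (segPath x y dxv dyv c n ++ r.1, r.2)

-- The common canonical spiral: ring of size w with top-left (x0,y0), first value c,
-- truncated at w = 2 exactly as both programs truncate.
def ringPath : Nat → Int → Int → Int → List ((Int × Int) × Int)
  | 0, _, _, _ => []
  | 1, _, _, _ => []
  | 2, x0, y0, c => segPath x0 (y0 - 1) 0 1 c 2 ++ segPath x0 (y0 + 1) 1 0 (c + 2) 1
  | (w + 3), x0, y0, c =>
      let Wi : Int := (w : Int) + 3
      segPath x0 (y0 - 1) 0 1 c (w + 3)
      ++ (segPath x0 (y0 + Wi - 1) 1 0 (c + Wi) (w + 2)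
      ++ (segPath (x0 + Wi - 1) (y0 + Wi - 1) 0 (-1) (c + 2 * Wi - 1) (w + 2)
      ++ (segPath (x0 + Wi - 1) y0 (-1) 0 (c + 3 * Wi - 2) (w + 1)
      ++ ringPath (w + 1) (x0 + 1) (y0 + 1) (c + 4 * Wi - 4))))

-- ---- extraction: the imperative ports compute applyWrites of their pure paths ----

theorem inner_fold_eq (i : Int) (l : List Int) :
    ∀ (m : List (List Int)) (x y c : Int),
      l.foldl
        (fun (st2 : List (List Int) × Int × Int × Int) _j =>
          let x := st2.2.1 + PySem.List.pyGetD [0, 1, 0, -1] (PySem.Int.mod i 4) 0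
          let y := st2.2.2.1 + PySem.List.pyGetD [1, 0, -1, 0] (PySem.Int.mod i 4) 0
          let c := st2.2.2.2
          (pySetCell st2.1 x y c, x, y, c + 1)) (m, x, y, c)
      = (applyWrites (segPath x y (PySem.List.pyGetD [0, 1, 0, -1] (PySem.Int.mod i 4) 0)
            (PySem.List.pyGetD [1, 0, -1, 0] (PySem.Int.mod i 4) 0) c l.length) m,
         x + PySem.List.pyGetD [0, 1, 0, -1] (PySem.Int.mod i 4) 0 * l.length,
         y + PySem.List.pyGetD [1, 0, -1, 0] (PySem.Int.mod i 4) 0 * l.length,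
         c + l.length) := by
  induction l with
  | nil => intro m x y c; simp [applyWrites, segPath]
  | cons hd tl ih =>
      intro m x y c
      simp only [List.foldl_cons]
      rw [ih]
      simp [applyWrites, segPath]
      and_intros <;> ring

theorem outer_fold_eq (L : Int) (is : List Int) :
    ∀ (m : List (List Int)) (x y c : Int),
      is.foldl
        (fun (st : List (List Int) × Int × Int × Int) i =>
          (PySem.List.pyRange 0 (PySem.Int.floordiv (L + L - i) 2) 1).foldl
            (fun (st2 : List (List Int) × Int × Int × Int) _j =>
              let x := st2.2.1 + PySem.List.pyGetD [0, 1, 0, -1] (PySem.Int.mod i 4) 0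
              let y := st2.2.2.1 + PySem.List.pyGetD [1, 0, -1, 0] (PySem.Int.mod i 4) 0
              let c := st2.2.2.2
              (pySetCell st2.1 x y c, x, y, c + 1))
            st) (m, x, y, c)
      = (applyWrites (pathGenA L is x y c).1 m, (pathGenA L is x y c).2) := by
  induction is with
  | nil => intro m x y c; simp [pathGenA, applyWrites]
  | cons i rest ih =>
      intro m x y c
      simp only [List.foldl_cons]
      rw [inner_fold_eq i]
      rw [ih]
      simp [pathGenA, applyWrites_append, PySem.List.length_pyRange_one]

theorem fillEdge_eq (g : List (List Int)) (x y dx dy steps c last : Int) :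
    fillEdge g x y dx dy steps c last
      = (applyWrites (edgePath x y dx dy steps c last) g,
         c + (edgePath x y dx dy steps c last).length) := by
  fun_induction fillEdge g x y dx dy steps c last with
  | case1 g x y steps c h ih =>
      rw [edgePath, if_pos h]
      simp [applyWrites] at ih ⊢
      rw [ih]; simp only [Prod.mk.injEq]; exact ⟨trivial, by ring⟩
  | case2 g x y steps c h =>
      rw [edgePath, if_neg h]; simp [applyWrites]

theorem spiralLoop_eq (g : List (List Int)) (top bottom left right c last : Int) :
    spiralLoop g top bottom left right c last
      = applyWrites (loopPath top bottom left right c last) g := by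
  fun_induction spiralLoop g top bottom left right c last with
  | case1 g top bottom left right c h p1 p2 p3 p4 ih =>
      rw [ih]
      conv_rhs => rw [loopPath, if_pos h]
      simp only [applyWrites_append]
      simp only [p1, p2, p3, p4, fillEdge_eq]
  | case2 g top bottom left right c h =>
      rw [loopPath, if_neg h]; simp [applyWrites]

-- ---- the core: both pure paths are the canonical ring decomposition ----

theorem edgePath_full (n : Nat) :
    ∀ (x y dx dy c last : Int), c + n ≤ last + 1 →
      edgePath x y dx dy (n : Int) c last = segPath (x - dx) (y - dy) dx dy c n := by
  induction n with
  | zero => intro x y dx dy c last _; rw [edgePath]; simp [segPath]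
  | succ n ih =>
      intro x y dx dy c last hb
      rw [edgePath, if_pos (by constructor <;> omega)]
      rw [show ((n + 1 : Nat) : Int) - 1 = (n : Int) by push_cast; ring]
      rw [ih (x + dx) (y + dy) dx dy (c + 1) last (by omega)]
      simp [segPath]

theorem pathGenA_ring (w : Nat) :
    ∀ (L x0 y0 c : Int), (4 : Int) ∣ (2 * L - 2 * w) →
      (pathGenA L (PySem.List.pyRange (2 * L - 2 * w) (2 * L - 2) 1) x0 (y0 - 1) c).1
        = ringPath w x0 y0 c := by
  induction w using Nat.strong_induction_on with
  | _ w ih =>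
  rcases w with _ | (_ | (_ | v))
  · intro L x0 y0 c hdiv
    rw [PySem.List.pyRange_one, show ((2 * L - 2) - (2 * L - 2 * ((0:Nat):Int))).toNat = 0 by push_cast; omega]
    simp [pathGenA, ringPath]
  · intro L x0 y0 c hdiv
    rw [PySem.List.pyRange_one, show ((2 * L - 2) - (2 * L - 2 * ((1:Nat):Int))).toNat = 0 by push_cast; omega]
    simp [pathGenA, ringPath]
  · intro L x0 y0 c hdiv
    push_cast at hdiv
    push_cast
    rw [PySem.List.pyRange_one_cons (by omega), PySem.List.pyRange_one_cons (by omega),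
        PySem.List.pyRange_one, show ((2 * L - 2) - (2 * L - 4 + 1 + 1)).toNat = 0 by omega]
    simp only [List.range_zero, List.map_nil, pathGenA]
    have hm0 : PySem.Int.mod (2 * L - 4) 4 = 0 := by
      rw [PySem.Int.mod_eq_emod_of_pos (by norm_num)]; omega
    have hm1 : PySem.Int.mod (2 * L - 4 + 1) 4 = 1 := by
      rw [PySem.Int.mod_eq_emod_of_pos (by norm_num)]; omega
    have hf0 : (PySem.Int.floordiv (L + L - (2 * L - 4)) 2).toNat = 2 := by
      rw [show L + L - (2 * L - 4) = (4 : Int) by ring]; decide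
    have hf1 : (PySem.Int.floordiv (L + L - (2 * L - 4 + 1)) 2).toNat = 1 := by
      rw [show L + L - (2 * L - 4 + 1) = (3 : Int) by ring]; decide
    simp only [hm0, hm1, hf0, hf1]
    norm_num [PySem.List.pyGetD]
    have : ringPath 2 x0 y0 c = segPath x0 (y0 - 1) 0 1 c 2 ++ segPath x0 (y0 + 1) 1 0 (c + 2) 1 := rfl
    rw [this]
    ring_nf
  · intro L x0 y0 c hdiv
    push_cast at hdiv
    push_cast
    rw [PySem.List.pyRange_one_cons (by omega), PySem.List.pyRange_one_cons (by omega),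
        PySem.List.pyRange_one_cons (by omega), PySem.List.pyRange_one_cons (by omega)]
    simp only [pathGenA]
    have hm0 : PySem.Int.mod (2 * L - 2 * ((v:Int) + 1 + 1 + 1)) 4 = 0 := by
      rw [PySem.Int.mod_eq_emod_of_pos (by norm_num)]; omega
    have hm1 : PySem.Int.mod (2 * L - 2 * ((v:Int) + 1 + 1 + 1) + 1) 4 = 1 := by
      rw [PySem.Int.mod_eq_emod_of_pos (by norm_num)]; omega
    have hm2 : PySem.Int.mod (2 * L - 2 * ((v:Int) + 1 + 1 + 1) + 1 + 1) 4 = 2 := by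
      rw [PySem.Int.mod_eq_emod_of_pos (by norm_num)]; omega
    have hm3 : PySem.Int.mod (2 * L - 2 * ((v:Int) + 1 + 1 + 1) + 1 + 1 + 1) 4 = 3 := by
      rw [PySem.Int.mod_eq_emod_of_pos (by norm_num)]; omega
    have hf0 : (PySem.Int.floordiv (L + L - (2 * L - 2 * ((v:Int) + 1 + 1 + 1))) 2).toNat = v + 3 := by
      rw [show L + L - (2 * L - 2 * ((v:Int) + 1 + 1 + 1)) = 2 * (v:Int) + 6 by ring,
          PySem.Int.floordiv_eq_ediv_of_pos (by norm_num)]; omega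
    have hf1 : (PySem.Int.floordiv (L + L - (2 * L - 2 * ((v:Int) + 1 + 1 + 1) + 1)) 2).toNat = v + 2 := by
      rw [show L + L - (2 * L - 2 * ((v:Int) + 1 + 1 + 1) + 1) = 2 * (v:Int) + 5 by ring,
          PySem.Int.floordiv_eq_ediv_of_pos (by norm_num)]; omega
    have hf2 : (PySem.Int.floordiv (L + L - (2 * L - 2 * ((v:Int) + 1 + 1 + 1) + 1 + 1)) 2).toNat = v + 2 := by
      rw [show L + L - (2 * L - 2 * ((v:Int) + 1 + 1 + 1) + 1 + 1) = 2 * (v:Int) + 4 by ring,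
          PySem.Int.floordiv_eq_ediv_of_pos (by norm_num)]; omega
    have hf3 : (PySem.Int.floordiv (L + L - (2 * L - 2 * ((v:Int) + 1 + 1 + 1) + 1 + 1 + 1)) 2).toNat = v + 1 := by
      rw [show L + L - (2 * L - 2 * ((v:Int) + 1 + 1 + 1) + 1 + 1 + 1) = 2 * (v:Int) + 3 by ring,
          PySem.Int.floordiv_eq_ediv_of_pos (by norm_num)]; omega
    simp only [hm0, hm1, hm2, hm3, hf0, hf1, hf2, hf3]
    norm_num [PySem.List.pyGetD]
    norm_num [show ([0, 1, 0, -1] : List Int)[Int.toNat 2] = 0 from rfl,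
              show ([0, 1, 0, -1] : List Int)[Int.toNat 3] = -1 from rfl,
              show ([1, 0, -1, 0] : List Int)[Int.toNat 2] = -1 from rfl,
              show ([1, 0, -1, 0] : List Int)[Int.toNat 3] = 0 from rfl]
    rw [show (2 * L - 2 * ((v:Int) + 1 + 1 + 1) + 1 + 1 + 1 + 1) = 2 * L - 2 * ((v + 1 : Nat) : Int) by push_cast; ring,
        show (x0 + ((v:Int) + 2) + (-1 + -(v:Int))) = x0 + 1 by ring,
        show (y0 - 1 + ((v:Int) + 3) + (-2 + -(v:Int))) = (y0 + 1) - 1 by ring]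
    rw [ih (v + 1) (by omega) L (x0 + 1) (y0 + 1) (c + ((v:Int) + 3) + ((v:Int) + 2) + ((v:Int) + 2) + ((v:Int) + 1)) (by push_cast; omega)]
    rw [show (v + 1 + 1 + 1) = v + 3 from rfl, ringPath]
    ring_nf

theorem loopPath_ring (w : Nat) :
    ∀ (x0 y0 c last : Int), last = c + (w : Int) * w - 2 →
      loopPath x0 (x0 + w - 1) y0 (y0 + w - 1) c last = ringPath w x0 y0 c := by
  induction w using Nat.strong_induction_on with
  | _ w ih =>
  rcases w with _ | (_ | (_ | v))
  · intro x0 y0 c last hlast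
    rw [loopPath, if_neg (by push_cast; omega)]; rfl
  · intro x0 y0 c last hlast
    rw [loopPath, if_neg (by push_cast at hlast ⊢; omega)]; rfl
  · intro x0 y0 c last hlast
    push_cast at hlast
    rw [loopPath, if_pos (by push_cast; omega)]
    norm_num
    have h1 : edgePath x0 y0 0 1 (y0 + 2 - 1 - y0 + 1) c last = segPath x0 (y0 - 1) 0 1 c 2 := by
      rw [show (y0 + 2 - 1 - y0 + 1 : Int) = ((2 : Nat) : Int) by push_cast; ring,
          edgePath_full 2 x0 y0 0 1 c last (by omega)]
      norm_num
    rw [h1]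
    simp only [segPath_length, Nat.cast_ofNat]
    have h2 : edgePath (x0 + 1) (y0 + 2 - 1) 1 0 (x0 + 2 - 1 - x0) (c + 2) last
        = segPath x0 (y0 + 1) 1 0 (c + 2) 1 := by
      rw [show (x0 + 2 - 1 - x0 : Int) = ((1 : Nat) : Int) by push_cast; ring,
          edgePath_full 1 _ _ _ _ _ _ (by omega)]
      norm_num
      ring_nf
    rw [h2]
    simp only [segPath_length, Nat.cast_one]
    have h3 : edgePath (x0 + 2 - 1) (y0 + 2 - 1 - 1) 0 (-1) (y0 + 2 - 1 - y0) (c + 2 + 1) last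
        = [] := by rw [edgePath, if_neg (by omega)]
    rw [h3]
    have h4 : edgePath (x0 + 2 - 1 - 1) y0 (-1) 0 (x0 + 2 - 1 - x0 - 1) (c + 2 + 1) last
        = [] := by rw [edgePath, if_neg (by omega)]
    have h5 : loopPath (x0 + 1) (x0 + 2 - 1 - 1) (y0 + 1) (y0 + 2 - 1 - 1) (c + 2 + 1) last
        = [] := by rw [loopPath, if_neg (by omega)]
    simp only [h4, h5, List.length_nil, List.append_nil, Nat.cast_zero, add_zero]
    simp [ringPath]
  · intro x0 y0 c last hlast
    have hv : (0 : Int) ≤ (v : Int) := Int.natCast_nonneg v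
    have hsq : (0 : Int) ≤ (v : Int) * v := mul_self_nonneg _
    have hl : last = c + (v : Int) * v + 6 * v + 7 := by rw [hlast]; push_cast; ring
    rw [loopPath, if_pos (by push_cast; omega)]
    push_cast
    have h1 : edgePath x0 y0 0 1 (y0 + ((v:Int) + 1 + 1 + 1) - 1 - y0 + 1) c last
        = segPath (x0 - 0) (y0 - 1) 0 1 c (v + 3) := by
      rw [show (y0 + ((v:Int) + 1 + 1 + 1) - 1 - y0 + 1) = ((v + 3 : Nat) : Int) by push_cast; ring]
      exact edgePath_full (v + 3) _ _ _ _ _ _ (by push_cast; omega)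
    rw [h1]
    simp only [segPath_length]
    push_cast
    have h2 : edgePath (x0 + 1) (y0 + ((v:Int) + 1 + 1 + 1) - 1) 1 0 (x0 + ((v:Int) + 1 + 1 + 1) - 1 - x0) (c + ((v:Int) + 3)) last
        = segPath (x0 + 1 - 1) (y0 + ((v:Int) + 1 + 1 + 1) - 1 - 0) 1 0 (c + ((v:Int) + 3)) (v + 2) := by
      rw [show (x0 + ((v:Int) + 1 + 1 + 1) - 1 - x0) = ((v + 2 : Nat) : Int) by push_cast; ring]
      exact edgePath_full (v + 2) _ _ _ _ _ _ (by push_cast; omega)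
    rw [h2]
    simp only [segPath_length]
    push_cast
    have h3 : edgePath (x0 + ((v:Int) + 1 + 1 + 1) - 1) (y0 + ((v:Int) + 1 + 1 + 1) - 1 - 1) 0 (-1) (y0 + ((v:Int) + 1 + 1 + 1) - 1 - y0) (c + ((v:Int) + 3) + ((v:Int) + 2)) last
        = segPath (x0 + ((v:Int) + 1 + 1 + 1) - 1 - 0) (y0 + ((v:Int) + 1 + 1 + 1) - 1 - 1 - (-1)) 0 (-1) (c + ((v:Int) + 3) + ((v:Int) + 2)) (v + 2) := by
      rw [show (y0 + ((v:Int) + 1 + 1 + 1) - 1 - y0) = ((v + 2 : Nat) : Int) by push_cast; ring]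
      exact edgePath_full (v + 2) _ _ _ _ _ _ (by push_cast; omega)
    rw [h3]
    simp only [segPath_length]
    push_cast
    have h4 : edgePath (x0 + ((v:Int) + 1 + 1 + 1) - 1 - 1) y0 (-1) 0 (x0 + ((v:Int) + 1 + 1 + 1) - 1 - x0 - 1) (c + ((v:Int) + 3) + ((v:Int) + 2) + ((v:Int) + 2)) last
        = segPath (x0 + ((v:Int) + 1 + 1 + 1) - 1 - 1 - (-1)) (y0 - 0) (-1) 0 (c + ((v:Int) + 3) + ((v:Int) + 2) + ((v:Int) + 2)) (v + 1) := by
      rw [show (x0 + ((v:Int) + 1 + 1 + 1) - 1 - x0 - 1) = ((v + 1 : Nat) : Int) by push_cast; ring]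
      exact edgePath_full (v + 1) _ _ _ _ _ _ (by push_cast; omega)
    rw [h4]
    simp only [segPath_length]
    push_cast
    have h5 : loopPath (x0 + 1) (x0 + ((v:Int) + 1 + 1 + 1) - 1 - 1) (y0 + 1) (y0 + ((v:Int) + 1 + 1 + 1) - 1 - 1) (c + ((v:Int) + 3) + ((v:Int) + 2) + ((v:Int) + 2) + ((v:Int) + 1)) last
        = ringPath (v + 1) (x0 + 1) (y0 + 1) (c + ((v:Int) + 3) + ((v:Int) + 2) + ((v:Int) + 2) + ((v:Int) + 1)) := by
      rw [show (x0 + ((v:Int) + 1 + 1 + 1) - 1 - 1) = (x0 + 1) + ((v + 1 : Nat) : Int) - 1 by push_cast; ring,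
          show (y0 + ((v:Int) + 1 + 1 + 1) - 1 - 1) = (y0 + 1) + ((v + 1 : Nat) : Int) - 1 by push_cast; ring]
      exact ih (v + 1) (by omega) _ _ _ _ (by rw [hl]; push_cast; ring)
    rw [h5]
    conv_rhs => rw [ringPath]
    ring_nf

-- ===== VERDICT (by name: the statement is the Claim_ definition above) =====
theorem define_goal_state_spec : Claim_equal_define_goal_state := by
  intro L _
  unfold Spec_define_goal_state define_goal_state define_goal_state_alt
  dsimp only
  rw [outer_fold_eq]
  simp only [PySem.List.foldl_append_singleton_eq_self]
  rw [PySem.List.foldl_append_eq_flatten, List.nil_append]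
  by_cases hL : L ≤ 0
  · rw [if_pos hL]
    rw [PySem.List.pyRange_one, show (L + L - 2 - 0).toNat = 0 by omega]
    rw [PySem.List.pyRange_one, show (L - 0).toNat = 0 by omega]
    simp [pathGenA, applyWrites]
  · rw [if_neg hL]
    have hcast : ((L.toNat : Nat) : Int) = L := by omega
    have hA := pathGenA_ring L.toNat L 0 0 1 (by rw [hcast]; simp)
    rw [hcast] at hA
    norm_num at hA
    have hB := loopPath_ring L.toNat 0 0 1 (L * L - 1)
      (by rw [hcast]; ring)
    rw [hcast] at hB
    norm_num at hB
    rw [spiralLoop_eq]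
    rw [show L + L - 2 = 2 * L - 2 by ring]
    rw [hA, hB]
    simp [List.flatMap_id]
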